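-- pv_equiv track=rewrite | github.com/Koprvhdix/Quantum_entanglement_structure_detection | partition.py | checkout_partition
-- ===== SOURCE A (Python) =====
-- def checkout_partition(partition_type_list, partite_number):
--     number_count = 0
--     for part in partition_type_list:
--         if len(part) == 0:
--             return False
--         else:
--             number_count += len(part)
--     if number_count != partite_number:
--         return False
--
--     for number in range(1, partite_number + 1):
--         is_contain = False
--         for part in partition_type_list:
--             if number in part:
--                 is_contain = True
--         if not is_contain:
--             return False
--     return True
-- ===== SOURCE B (Python) =====
-- def checkout_partition(partition_type_list, partite_number):
--     flat = []
--     for part in partition_type_list: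
--         if not part:
--             return False
--         flat.extend(part)
--     return len(flat) == partite_number and sorted(flat) == list(range(1, partite_number + 1))
-- ===== Notes on version B (the rewrite author's own statement) =====
-- stated objective: simpler
-- what changed: Replaces A's per-number nested membership scan over all parts with one flatten, then a single sort-and-compare against the canonical range 1..N (with a length check).
import Mathlib
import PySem

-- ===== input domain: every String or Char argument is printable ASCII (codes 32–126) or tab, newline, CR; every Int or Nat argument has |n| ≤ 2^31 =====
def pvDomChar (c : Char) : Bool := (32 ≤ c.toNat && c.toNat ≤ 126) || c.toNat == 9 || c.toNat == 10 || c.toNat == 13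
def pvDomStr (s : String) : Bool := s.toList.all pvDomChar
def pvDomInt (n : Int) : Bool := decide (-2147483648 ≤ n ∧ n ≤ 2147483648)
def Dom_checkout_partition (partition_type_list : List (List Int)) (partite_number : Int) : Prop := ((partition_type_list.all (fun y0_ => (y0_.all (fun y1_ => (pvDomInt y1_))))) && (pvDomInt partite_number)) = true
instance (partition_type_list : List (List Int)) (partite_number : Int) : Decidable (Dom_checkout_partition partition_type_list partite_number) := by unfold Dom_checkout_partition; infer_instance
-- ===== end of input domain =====

-- B replaces A's per-number nested membership scans with one flatten + sort-and-compare
-- against the canonical range 1..N (objective: simpler; no speed claim).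

-- ===== PORT A =====
-- first loop: counts elements, returning none on an empty part (Python's early `return False`)
def pvALoop1 : List (List Int) → Int → Option Int
  | [], acc => some acc
  | part :: rest, acc =>
      if part.length = 0 then none else pvALoop1 rest (acc + part.length)

-- inner loop: `for part in …: if number in part: is_contain = True`
def pvAContains (pl : List (List Int)) (num : Int) : Bool :=
  pl.foldl (fun b part => if part.contains num then true else b) false

-- second loop over range(1, N+1), early `return False` on a missing number
def pvALoop2 (pl : List (List Int)) : List Int → Bool
  | [] => true
  | num :: rest => if !(pvAContains pl num) then false else pvALoop2 pl rest

def checkout_partition (partition_type_list : List (List Int)) (partite_number : Int) : Bool :=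
  match pvALoop1 partition_type_list 0 with
  | none => false
  | some cnt =>
      if cnt != partite_number then false
      else pvALoop2 partition_type_list (PySem.List.pyRange 1 (partite_number + 1) 1)

-- ===== PORT B =====
-- flatten loop with early `return False` on an empty part
def pvBFlat : List (List Int) → List Int → Option (List Int)
  | [], flat => some flat
  | part :: rest, flat =>
      if part.isEmpty then none else pvBFlat rest (flat ++ part)

def checkout_partition_alt (partition_type_list : List (List Int)) (partite_number : Int) : Bool :=
  match pvBFlat partition_type_list [] with
  | none => false
  | some flat =>
      ((flat.length : Int) == partite_number)
        && (PySem.List.sorted flat (fun x => x) false == PySem.List.pyRange 1 (partite_number + 1) 1)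

-- ===== PRECONDITION & SPEC =====
def Spec_checkout_partition (partition_type_list : List (List Int)) (partite_number : Int) (out : Bool) : Prop := out = checkout_partition_alt partition_type_list partite_number
instance (partition_type_list : List (List Int)) (partite_number : Int) (out : Bool) : Decidable (Spec_checkout_partition partition_type_list partite_number out) := by unfold Spec_checkout_partition; infer_instance

-- ===== CLAIM (what is proved, stated in full; the proofs are below) =====
def Claim_equal_checkout_partition : Prop := ∀ (partition_type_list : List (List Int)) (partite_number : Int), Dom_checkout_partition partition_type_list partite_number → Spec_checkout_partition partition_type_list partite_number (checkout_partition partition_type_list partite_number)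

-- ===== LEMMAS AND PROOFS =====

lemma pvALoop1_none (pl : List (List Int)) (acc : Int) (h : ∃ p ∈ pl, p = []) :
    pvALoop1 pl acc = none := by
  induction pl generalizing acc with
  | nil => simp at h
  | cons part rest ih =>
      by_cases hp : part = []
      · simp [pvALoop1, hp]
      · have hr : ∃ p ∈ rest, p = [] := by
          rcases h with ⟨p, hp', he⟩
          rcases List.mem_cons.mp hp' with rfl | ht
          · exact absurd he hp
          · exact ⟨p, ht, he⟩
        simp [pvALoop1, List.length_eq_zero_iff, hp, ih _ hr]

lemma pvALoop1_some (pl : List (List Int)) (acc : Int) (h : ∀ p ∈ pl, p ≠ []) :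
    pvALoop1 pl acc = some (acc + pl.flatten.length) := by
  induction pl generalizing acc with
  | nil => simp [pvALoop1]
  | cons part rest ih =>
      have hp : part ≠ [] := h part (by simp)
      have hr : ∀ p ∈ rest, p ≠ [] := fun p hm => h p (by simp [hm])
      simp [pvALoop1, List.length_eq_zero_iff, hp, ih _ hr]
      ring

lemma pvBFlat_none (pl : List (List Int)) (acc : List Int) (h : ∃ p ∈ pl, p = []) :
    pvBFlat pl acc = none := by
  induction pl generalizing acc with
  | nil => simp at h
  | cons part rest ih =>
      by_cases hp : part = []
      · simp [pvBFlat, hp]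
      · have hr : ∃ p ∈ rest, p = [] := by
          rcases h with ⟨p, hp', he⟩
          rcases List.mem_cons.mp hp' with rfl | ht
          · exact absurd he hp
          · exact ⟨p, ht, he⟩
        simp [pvBFlat, List.isEmpty_iff, hp, ih _ hr]

lemma pvBFlat_some (pl : List (List Int)) (acc : List Int) (h : ∀ p ∈ pl, p ≠ []) :
    pvBFlat pl acc = some (acc ++ pl.flatten) := by
  induction pl generalizing acc with
  | nil => simp [pvBFlat]
  | cons part rest ih =>
      have hp : part ≠ [] := h part (by simp)
      have hr : ∀ p ∈ rest, p ≠ [] := fun p hm => h p (by simp [hm])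
      simp [pvBFlat, List.isEmpty_iff, hp, ih _ hr]

lemma pvAContains_aux (pl : List (List Int)) (num : Int) (b : Bool) :
    pl.foldl (fun b part => if part.contains num then true else b) b
      = (b || pl.any (fun p => p.contains num)) := by
  induction pl generalizing b with
  | nil => simp
  | cons part rest ih =>
      simp only [List.foldl_cons, List.any_cons, ih]
      cases b <;> cases hc : part.contains num <;> simp [hc]  -- hc used in some branches

lemma pvAContains_iff (pl : List (List Int)) (num : Int) :
    pvAContains pl num = true ↔ num ∈ pl.flatten := by
  unfold pvAContains
  rw [pvAContains_aux]
  simp [List.mem_flatten, List.any_eq_true]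

lemma pvALoop2_iff (pl : List (List Int)) (nums : List Int) :
    pvALoop2 pl nums = true ↔ ∀ num ∈ nums, pvAContains pl num = true := by
  induction nums with
  | nil => simp [pvALoop2]
  | cons num rest ih =>
      by_cases hc : pvAContains pl num = true
      · simp [pvALoop2, hc, ih]
      · have hx := Bool.eq_false_iff.mpr hc
        have hl : pvALoop2 pl (num :: rest) = false := by simp [pvALoop2, hx]
        rw [hl]
        simp only [Bool.false_eq_true, false_iff]
        intro hall
        exact hc (hall num (List.mem_cons_self ..))

lemma pv_cover_iff_sorted (flat : List Int) (n : Int) (hlen : (flat.length : Int) = n) :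
    (∀ x ∈ PySem.List.pyRange 1 (n + 1) 1, x ∈ flat)
      ↔ PySem.List.sorted flat (fun x => x) false = PySem.List.pyRange 1 (n + 1) 1 := by
  constructor
  · intro hsub
    have hRlen : (PySem.List.pyRange 1 (n + 1) 1).length = flat.length := by
      rw [PySem.List.length_pyRange_one]; omega
    have hsp : List.Subperm (PySem.List.pyRange 1 (n + 1) 1) flat :=
      (PySem.List.nodup_pyRange_one 1 (n + 1)).subperm (fun x hx => hsub x hx)
    have hperm := hsp.perm_of_length_le (le_of_eq hRlen.symm)
    exact PySem.List.sorted_eq_of_perm_of_pairwise_lt flat _ (fun x => x) hperm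
      (PySem.List.pairwise_lt_pyRange_one 1 (n + 1))
  · intro hs x hx
    exact (PySem.List.sorted_perm flat (fun x => x) false).mem_iff.mp (hs ▸ hx)

-- ===== VERDICT (by name: the statement is the Claim_ definition above) =====
theorem checkout_partition_spec : Claim_equal_checkout_partition := by
  intro pl n _
  unfold Spec_checkout_partition checkout_partition checkout_partition_alt
  by_cases h : ∃ p ∈ pl, p = []
  · rw [pvALoop1_none pl 0 h, pvBFlat_none pl [] h]
  · push_neg at h
    rw [pvALoop1_some pl 0 h, pvBFlat_some pl [] h]
    simp only [zero_add, List.nil_append]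
    by_cases hn : (pl.flatten.length : Int) = n
    · have hc1 : ((pl.flatten.length : Int) != n) = false := by
        rw [bne_eq_false_iff_eq]; exact hn
      have hc2 : ((pl.flatten.length : Int) == n) = true := beq_iff_eq.mpr hn
      rw [hc1, hc2, if_neg Bool.false_ne_true, Bool.true_and]
      rcases eq_or_ne (PySem.List.sorted pl.flatten (fun x => x) false)
          (PySem.List.pyRange 1 (n + 1) 1) with hs | hs
      · rw [beq_iff_eq.mpr hs]
        exact (pvALoop2_iff pl _).mpr (fun num hnum =>
          (pvAContains_iff pl num).mpr ((pv_cover_iff_sorted pl.flatten n hn).mpr hs num hnum))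
      · rw [beq_eq_false_iff_ne.mpr hs, Bool.eq_false_iff]
        intro habs
        exact ((pv_cover_iff_sorted pl.flatten n hn).not.mpr hs)
          (fun x hx => (pvAContains_iff pl x).mp ((pvALoop2_iff pl _).mp habs x hx))
    · have hc1 : ((pl.flatten.length : Int) != n) = true := bne_iff_ne.mpr hn
      have hc2 : ((pl.flatten.length : Int) == n) = false := beq_eq_false_iff_ne.mpr hn
      rw [hc1, hc2, if_pos rfl, Bool.false_and]
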